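-- pv_equiv track=rewrite | github.com/saribekyan/rau-independence-cup-2019 | problems/J-quality/sol.py | matrixForString
-- ===== SOURCE A (Python) =====
-- import string
--
-- alphabet = string.ascii_lowercase
--
-- def zeros(n, m):
--     return [[0] * m for i in range(n)]
--
-- def moveRight(s1, s2): # len(s2) >= len(s1)
--     for i in range(1, len(s1)):
--         if s1[i:] == s2[:len(s1) - i]:
--             return i
--     return len(s1)
--
-- def matrixForString(K, X):
--     n = len(X)
--
--     t2i = lambda p, k: p * (K + 1) + k # tuple to index
--     i2t = lambda i: (i // (K + 1), i % (K + 1)) # index to tuple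
--
--     N = t2i(n - 1, K) + 1 # matrix size
--     A = zeros(N, N)
--
--     for i in range(N):
--         p, k = i2t(i)
--         for x in alphabet:
--             if x == X[p]:
--                 if p == n - 1:
--                     if k > 0:
--                         A[i][t2i(n - moveRight(X, X), k - 1)] += 1
--                 else:
--                     A[i][t2i(p + 1, k)] += 1
--             else:
--                 A[i][t2i(p + 1 - moveRight(X[:p] + x, X), k)] += 1
--
--     return A, t2i(0, K)
-- ===== SOURCE B (Python) =====
-- import string
--
-- alphabet = string.ascii_lowercase
--
-- def matrixForString(K, X):
--     n = len(X)
--     # Incremental border-set DP: borders[p] lists every l in [0, p] with X[:l] a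
--     # suffix of X[:p], in decreasing order; each step extends the previous set by
--     # one character instead of comparing substrings.
--     borders = []
--     cur = [0]
--     for p in range(n):
--         borders.append(cur)
--         cur = [l + 1 for l in cur if X[l] == X[p]] + [0]
--     bfull = 0
--     for l in cur:          # cur = border set of the whole X, decreasing
--         if l < n:
--             bfull = l      # longest proper border of X
--             break
--     N = n * (K + 1)
--     rows = []
--     for p in range(n):
--         xp = X[p]
--         tgts = []
--         for x in alphabet:
--             if x != xp:
--                 q = 0
--                 for l in borders[p]:   # decreasing, so first hit is the longest
--                     if l < p and X[l] == x:
--                         q = l + 1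
--                         break
--                 tgts.append(q)
--         for k in range(K + 1):
--             row = [0] * N
--             for q in tgts:
--                 row[q * (K + 1) + k] += 1
--             if xp in alphabet:
--                 if p == n - 1:
--                     if k > 0:
--                         row[bfull * (K + 1) + (k - 1)] += 1
--                 else:
--                     row[(p + 1) * (K + 1) + k] += 1
--             rows.append(row)
--     return rows, K
-- ===== Notes on version B (the rewrite author's own statement) =====
-- stated objective: faster
-- what changed: A recomputes the brute-force overlap scan moveRight(X[:p]+x, X) (repeated substring slicing and comparison) for every state (p,k) and every letter; B never compares substrings: it maintains the set of border lengths of X[:p] incrementally one character at a time (border-set dynamic programming), reads each transition target off that set, and takes the full-match fallback as the longest proper border from the final set.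
import Mathlib
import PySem

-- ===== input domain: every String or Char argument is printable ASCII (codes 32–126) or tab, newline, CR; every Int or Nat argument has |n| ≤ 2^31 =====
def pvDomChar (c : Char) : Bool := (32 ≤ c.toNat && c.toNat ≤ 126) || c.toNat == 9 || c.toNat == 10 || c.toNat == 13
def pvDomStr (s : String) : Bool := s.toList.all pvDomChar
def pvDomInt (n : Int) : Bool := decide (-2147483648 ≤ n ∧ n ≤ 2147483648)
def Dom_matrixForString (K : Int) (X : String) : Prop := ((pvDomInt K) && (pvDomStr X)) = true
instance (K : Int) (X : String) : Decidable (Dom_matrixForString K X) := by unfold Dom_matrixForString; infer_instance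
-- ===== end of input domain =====

-- B replaces A's per-state brute-force substring comparisons (moveRight) by an incremental
-- border-set dynamic programme computed once over X (objective: faster).

-- ===== PORT A =====
def pvAlphabet : List Char := "abcdefghijklmnopqrstuvwxyz".toList

-- the lambda 't2i = lambda p, k: p * (K + 1) + k'
def pvT2i (K p k : Int) : Int := p * (K + 1) + k

-- zeros(n, m)
def pvZeros (n m : Int) : List (List Int) :=
  (PySem.List.pyRange 0 n 1).map (fun _ => List.replicate m.toNat (0 : Int))

-- moveRight's loop 'for i in range(1, len(s1)): if s1[i:] == s2[:len(s1) - i]: return i'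
def pvMoveRightGo (s1 s2 : List Char) : List Int → Int
  | [] => (s1.length : Int)
  | i :: is =>
      if PySem.List.slice s1 (some i) none = PySem.List.slice s2 none (some ((s1.length : Int) - i))
      then i
      else pvMoveRightGo s1 s2 is

def pvMoveRight (s1 s2 : List Char) : Int :=
  pvMoveRightGo s1 s2 (PySem.List.pyRange 1 (s1.length : Int) 1)

-- 'row[j] += 1' ported by hand; exact for 0 ≤ j < len row, the only indices either program produces
def pvInc1 (r : List Int) (j : Int) : List Int := r.modify j.toNat (· + 1)

-- 'A[i][j] += 1' on the matrix; exact for the in-range nonnegative i, j of A's loop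
def pvMatInc (M : List (List Int)) (i j : Int) : List (List Int) :=
  M.modify i.toNat (fun r => pvInc1 r j)

def matrixForString (K : Int) (X : String) : List (List Int) × Int :=
  let Xs := X.toList
  let n : Int := (Xs.length : Int)
  let N : Int := pvT2i K (n - 1) K + 1
  -- i2t's '//' and '%' are PySem floordiv/mod; Python's i2t would raise on K + 1 = 0, but the
  -- loop range is empty then (N = 0), so the division is never reached — the total port is exact.
  let A :=
    (PySem.List.pyRange 0 N 1).foldl (fun M i =>
      let p := PySem.Int.floordiv i (K + 1)
      let k := PySem.Int.mod i (K + 1)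
      pvAlphabet.foldl (fun M x =>
        if x = PySem.List.pyGetD Xs p ' ' then  -- X[p]: exact, 0 ≤ p < n inside the loop
          if p = n - 1 then
            if k > 0 then pvMatInc M i (pvT2i K (n - pvMoveRight Xs Xs) (k - 1)) else M
          else pvMatInc M i (pvT2i K (p + 1) k)
        else
          pvMatInc M i (pvT2i K (p + 1 - pvMoveRight (PySem.List.slice Xs none (some p) ++ [x]) Xs) k)
      ) M
    ) (pvZeros N N)
  (A, pvT2i K 0 K)

-- ===== PORT B =====
-- '[l + 1 for l in cur if X[l] == X[p]] + [0]'  (X[l], X[p]: exact, the indices are in range)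
def pvStep (Xs : List Char) (p : Int) (cur : List Int) : List Int :=
  (cur.filter (fun l => PySem.List.pyGetD Xs l ' ' == PySem.List.pyGetD Xs p ' ')).map (· + 1) ++ [0]

-- the first loop: 'borders = []; cur = [0]; for p in range(n): borders.append(cur); cur = …'
def pvBuild (Xs : List Char) : List (List Int) × List Int :=
  (PySem.List.pyRange 0 (Xs.length : Int) 1).foldl
    (fun bc p => (bc.1 ++ [bc.2], pvStep Xs p bc.2)) ([], [(0 : Int)])

-- 'bfull = 0; for l in cur: if l < n: bfull = l; break'
def pvFirstLt (n : Int) : List Int → Int → Int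
  | [], b => b
  | l :: ls, b => if l < n then l else pvFirstLt n ls b

-- 'q = 0; for l in borders[p]: if l < p and X[l] == x: q = l + 1; break'
def pvScanB (Xs : List Char) (p : Int) (x : Char) : List Int → Int
  | [] => 0
  | l :: ls => if l < p ∧ PySem.List.pyGetD Xs l ' ' = x then l + 1 else pvScanB Xs p x ls

def matrixForString_alt (K : Int) (X : String) : List (List Int) × Int :=
  let Xs := X.toList
  let n : Int := (Xs.length : Int)
  let bc := pvBuild Xs
  let borders := bc.1
  let bfull := pvFirstLt n bc.2 0
  let N : Int := n * (K + 1)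
  let rows :=
    (PySem.List.pyRange 0 n 1).foldl (fun rows p =>
      let xp := PySem.List.pyGetD Xs p ' '   -- X[p]: exact, 0 ≤ p < n
      let tgts := (pvAlphabet.filter (fun x => x != xp)).map
        (fun x => pvScanB Xs p x (PySem.List.pyGetD borders p []))   -- borders[p]: exact, in range
      (PySem.List.pyRange 0 (K + 1) 1).foldl (fun rows k =>
        let row1 := tgts.foldl (fun r q => pvInc1 r (q * (K + 1) + k)) (List.replicate N.toNat (0 : Int))
        let row2 :=
          if pvAlphabet.contains xp then
            if p = n - 1 then
              (if k > 0 then pvInc1 row1 (bfull * (K + 1) + (k - 1)) else row1)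
            else pvInc1 row1 ((p + 1) * (K + 1) + k)
          else row1
        rows ++ [row2]
      ) rows
    ) []
  (rows, K)

-- ===== PRECONDITION & SPEC =====
def Spec_matrixForString (K : Int) (X : String) (out : List (List Int) × Int) : Prop := out = matrixForString_alt K X
instance (K : Int) (X : String) (out : List (List Int) × Int) : Decidable (Spec_matrixForString K X out) := by unfold Spec_matrixForString; infer_instance

-- ===== CLAIM (what is proved, stated in full; the proofs are below) =====
def Claim_equal_matrixForString : Prop := ∀ (K : Int) (X : String), Dom_matrixForString K X → Spec_matrixForString K X (matrixForString K X)

-- ===== LEMMAS AND PROOFS =====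

theorem length_foldl_inc (ts : List Int) (r : List Int) :
    (ts.foldl pvInc1 r).length = r.length := by
  induction ts generalizing r with
  | nil => rfl
  | cons t ts ih => simp [List.foldl_cons, ih, pvInc1, List.length_modify]

theorem getElem_foldl_inc (ts : List Int) (r : List Int) (hts : ∀ t ∈ ts, 0 ≤ t)
    (j : Nat) (hj : j < r.length) (hj2 : j < (ts.foldl pvInc1 r).length) :
    (ts.foldl pvInc1 r)[j]'hj2 = r[j] + (ts.count ((j : Int)) : Int) := by
  induction ts generalizing r with
  | nil => simp
  | cons t ts ih =>
    have ht : 0 ≤ t := hts t (by simp)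
    have hlen : j < (pvInc1 r t).length := by simp [pvInc1, List.length_modify, hj]
    simp only [List.foldl_cons]
    rw [ih (pvInc1 r t) (fun u hu => hts u (by simp [hu])) hlen
        (by rw [length_foldl_inc]; exact hlen)]
    rw [List.count_cons]
    have hstep : (pvInc1 r t)[j]'hlen = r[j] + (if t == (j : Int) then 1 else 0) := by
      unfold pvInc1
      rw [List.getElem_modify]
      by_cases h : t = (j : Int)
      · simp [h]
      · have : ¬ (t.toNat = j) := by omega
        simp [this, h]
    rw [hstep]
    push_cast
    ring

-- ---- border-set machinery (proof side) ----

-- the specification border list: all l ≤ m with X[:l] a suffix of X[:p], in decreasing order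
def pvBS (Xs : List Char) (p m : Nat) : List Int :=
  ((List.range (m+1)).reverse).filterMap
    (fun l => if Xs.take l <:+ Xs.take p then some ((l : Nat) : Int) else none)

def pvBordersSpec (Xs : List Char) : List (List Int) :=
  (List.range Xs.length).map (fun p => pvBS Xs p p)

theorem revRange_cons (m : Nat) : (List.range (m+1)).reverse = (m : Nat) :: (List.range m).reverse := by
  rw [List.range_succ, List.reverse_append]; rfl

theorem revRange_map_succ (m : Nat) :
    (List.range (m+1)).reverse = ((List.range m).reverse.map (· + 1)) ++ [0] := by
  rw [List.range_succ_eq_map]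
  simp [List.map_reverse]

theorem bs_zero (Xs : List Char) (p : Nat) : pvBS Xs p 0 = [(0 : Int)] := by
  simp [pvBS, List.nil_suffix]

theorem bs_succ (Xs : List Char) (p m : Nat) :
    pvBS Xs p (m+1)
      = (if Xs.take (m+1) <:+ Xs.take p then [(((m+1 : Nat)) : Int)] else []) ++ pvBS Xs p m := by
  by_cases h : Xs.take (m+1) <:+ Xs.take p <;>
    simp [pvBS, revRange_cons, List.filterMap_cons, h]

theorem bs_mem_nonneg (Xs : List Char) (p m : Nat) : ∀ l ∈ pvBS Xs p m, 0 ≤ l := by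
  intro l hl
  unfold pvBS at hl
  rw [List.mem_filterMap] at hl
  obtain ⟨a, _, ha⟩ := hl
  split at ha
  · cases ha; positivity
  · cases ha

theorem concat_suffix_concat (a u : List Char) (b c : Char) :
    ((a ++ [b]) <:+ (u ++ [c])) ↔ (b = c ∧ a <:+ u) := by
  rw [← List.reverse_prefix]
  simp [List.cons_prefix_cons, List.reverse_prefix]

theorem take_succ_suffix_concat (Xs u : List Char) (c : Char) (m : Nat) (hm : m < Xs.length) :
    (Xs.take (m+1) <:+ (u ++ [c])) ↔ (Xs.take m <:+ u ∧ Xs[m] = c) := by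
  rw [← List.take_concat_get' Xs m hm, concat_suffix_concat]
  tauto

-- the slice comparison made by moveRight, as a suffix statement
theorem slice_cond_iff (s Xs : List Char) (l : Nat) (h1 : l ≤ s.length) (h2 : l ≤ Xs.length) :
    (PySem.List.slice s (some ((s.length : Int) - (l : Int))) none
        = PySem.List.slice Xs none (some ((l : Nat) : Int)))
      ↔ Xs.take l <:+ s := by
  have hd : PySem.List.slice s (some ((s.length : Int) - (l : Int))) none = s.drop (s.length - l) := by
    rw [PySem.List.slice_from _ (by omega)]
    congr 1
    omega
  have ht : PySem.List.slice Xs none (some ((l : Nat) : Int)) = Xs.take l := by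
    rw [PySem.List.slice_to _ (by positivity)]
    simp
  rw [hd, ht, List.suffix_iff_eq_drop, List.length_take, Nat.min_eq_left h2, eq_comm]

theorem pyGetD_nat (Xs : List Char) (l : Nat) (hl : l < Xs.length) (d : Char) :
    PySem.List.pyGetD Xs ((l : Nat) : Int) d = Xs[l] := by
  rw [PySem.List.pyGetD_eq_getElem _ _ (by positivity) (by omega)]
  simp

-- pvStep advances the specification border list by one character
theorem bs_step (Xs : List Char) (p : Nat) (hp : p < Xs.length) :
    pvStep Xs ((p : Nat) : Int) (pvBS Xs p p) = pvBS Xs (p+1) (p+1) := by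
  unfold pvStep pvBS
  rw [revRange_map_succ (p+1), List.filterMap_append, List.filterMap_map]
  have h0 : List.filterMap
      (fun l => if Xs.take l <:+ Xs.take (p+1) then some ((l : Nat) : Int) else none) [0]
      = [(0 : Int)] := by
    simp [List.nil_suffix]
  rw [h0]
  congr 1
  rw [List.filter_filterMap, List.map_filterMap]
  apply List.filterMap_congr
  intro l hl
  have hlp : l ≤ p := by
    rw [List.mem_reverse, List.mem_range] at hl
    omega
  have hln : l < Xs.length := by omega
  have htake : Xs.take (p+1) = Xs.take p ++ [Xs[p]] := (List.take_concat_get' Xs p hp).symm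
  have hiff : (Xs.take (l+1) <:+ Xs.take (p+1)) ↔ (Xs.take l <:+ Xs.take p ∧ Xs[l] = Xs[p]) := by
    rw [htake]
    exact take_succ_suffix_concat Xs (Xs.take p) (Xs[p]) l hln
  simp only [Function.comp]
  by_cases hb : Xs.take l <:+ Xs.take p
  · rw [if_pos hb]
    by_cases hx : Xs[l] = Xs[p]
    · rw [if_pos (hiff.mpr ⟨hb, hx⟩)]
      simp [Option.filter, pyGetD_nat Xs l hln, pyGetD_nat Xs p hp, hx]
    · rw [if_neg (fun h => hx (hiff.mp h).2)]
      simp [Option.filter, pyGetD_nat Xs l hln, pyGetD_nat Xs p hp, hx]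
  · rw [if_neg hb, if_neg (fun h => hb (hiff.mp h).1)]
    simp

theorem build_aux (Xs : List Char) : ∀ m : Nat, m ≤ Xs.length →
    (List.range m).foldl (fun bc (p : Nat) => (bc.1 ++ [bc.2], pvStep Xs ((p : Nat) : Int) bc.2))
        (([], [(0 : Int)]) : List (List Int) × List Int)
      = ((List.range m).map (fun p => pvBS Xs p p), pvBS Xs m m) := by
  intro m
  induction m with
  | zero => intro _; simp [bs_zero]
  | succ m ih =>
    intro hm
    rw [List.range_succ, List.foldl_append, List.foldl_cons, List.foldl_nil, ih (by omega)]
    rw [List.map_append]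
    exact Prod.ext (by simp) (by simpa using bs_step Xs m (by omega))

theorem build_eq (Xs : List Char) :
    pvBuild Xs = (pvBordersSpec Xs, pvBS Xs Xs.length Xs.length) := by
  unfold pvBuild pvBordersSpec
  rw [PySem.List.pyRange_zero_nat, List.foldl_map]
  exact build_aux Xs Xs.length le_rfl

-- ---- the scan over the border list equals A's moveRight value ----

theorem scan_aux (Xs : List Char) (x : Char) (pn : Nat) (hpn : pn < Xs.length) :
    ∀ m : Nat, m < pn →
      pvScanB Xs (pn : Int) x (pvBS Xs pn m)
        = (pn : Int) + 1 - pvMoveRightGo (Xs.take pn ++ [x]) Xs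
            (PySem.List.pyRange ((pn : Int) - m) ((pn : Int) + 1) 1) := by
  have hs : (Xs.take pn ++ [x]).length = pn + 1 := by
    simp [Nat.min_eq_left (le_of_lt hpn)]
  intro m
  induction m with
  | zero =>
    intro h0
    rw [bs_zero]
    simp only [Nat.cast_zero, sub_zero]
    rw [PySem.List.pyRange_one_singleton]
    have hc1 : ((Xs.take pn ++ [x]).length : Int) - (pn : Int) = ((1 : Nat) : Int) := by
      rw [hs]; push_cast; ring
    have hc2 : (pn : Int) = ((Xs.take pn ++ [x]).length : Int) - ((1 : Nat) : Int) := by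
      rw [hs]; push_cast; ring
    have hcond : (PySem.List.slice (Xs.take pn ++ [x]) (some ((pn : Int))) none
        = PySem.List.slice Xs none (some (((Xs.take pn ++ [x]).length : Int) - (pn : Int))))
        ↔ Xs[0]'(by omega) = x := by
      rw [hc1, hc2, slice_cond_iff _ Xs 1 (by simp [hs]) (by omega)]
      rw [show (1 : Nat) = 0 + 1 from rfl, take_succ_suffix_concat Xs (Xs.take pn) x 0 (by omega)]
      simp [List.nil_suffix]
    have hg0 : PySem.List.pyGetD Xs (0 : Int) ' ' = Xs[0]'(by omega) := by
      have := pyGetD_nat Xs 0 (by omega) ' '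
      simpa using this
    simp only [pvScanB, pvMoveRightGo]
    by_cases hx : Xs[0]'(by omega) = x
    · rw [if_pos (show (0 : Int) < (pn : Int) ∧ PySem.List.pyGetD Xs 0 ' ' = x from
          ⟨by omega, by rw [hg0]; exact hx⟩), if_pos (hcond.mpr hx)]
      omega
    · rw [if_neg (fun hc => hx (hg0 ▸ hc.2)), if_neg (fun hcc => hx (hcond.mp hcc))]
      rw [hs]
      omega
  | succ m ih =>
    intro hm
    rw [bs_succ]
    push_cast
    have hr : PySem.List.pyRange ((pn : Int) - ((m : Int) + 1)) ((pn : Int) + 1) 1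
        = ((pn : Int) - ((m : Int) + 1)) :: PySem.List.pyRange ((pn : Int) - (m : Int)) ((pn : Int) + 1) 1 := by
      rw [PySem.List.pyRange_one_cons (by omega)]
      congr 2
      omega
    rw [hr]
    have hc1 : ((Xs.take pn ++ [x]).length : Int) - ((pn : Int) - ((m : Int) + 1)) = ((m + 2 : Nat) : Int) := by
      rw [hs]; push_cast; ring
    have hc2 : ((pn : Int) - ((m : Int) + 1)) = ((Xs.take pn ++ [x]).length : Int) - ((m + 2 : Nat) : Int) := by
      rw [hs]; push_cast; ring
    have hcond : (PySem.List.slice (Xs.take pn ++ [x]) (some ((pn : Int) - ((m : Int) + 1))) none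
        = PySem.List.slice Xs none (some (((Xs.take pn ++ [x]).length : Int) - ((pn : Int) - ((m : Int) + 1)))))
        ↔ (Xs.take (m+1) <:+ Xs.take pn ∧ Xs[m+1]'(by omega) = x) := by
      rw [hc1, hc2, slice_cond_iff _ Xs (m+2) (by simp [hs]; omega) (by omega)]
      exact take_succ_suffix_concat Xs (Xs.take pn) x (m+1) (by omega)
    have hg : PySem.List.pyGetD Xs ((m : Int) + 1) ' ' = Xs[m+1]'(by omega) := by
      have := pyGetD_nat Xs (m+1) (by omega) ' '
      push_cast at this
      exact this
    simp only [pvMoveRightGo]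
    by_cases hb : Xs.take (m+1) <:+ Xs.take pn
    · rw [if_pos hb]
      simp only [List.singleton_append, pvScanB]
      by_cases hx : Xs[m+1]'(by omega) = x
      · rw [if_pos (show (m : Int) + 1 < (pn : Int) ∧ PySem.List.pyGetD Xs ((m : Int) + 1) ' ' = x from
            ⟨by omega, by rw [hg]; exact hx⟩), if_pos (hcond.mpr ⟨hb, hx⟩)]
        omega
      · rw [if_neg (fun hc => hx (hg ▸ hc.2)), if_neg (fun hcc => hx (hcond.mp hcc).2)]
        exact ih (by omega)
    · rw [if_neg hb, if_neg (fun hcc => hb (hcond.mp hcc).1)]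
      simp only [List.nil_append]
      exact ih (by omega)

theorem scan_eq (Xs : List Char) (x : Char) (pn : Nat) (hpn : pn < Xs.length) :
    pvScanB Xs (pn : Int) x (pvBS Xs pn pn)
      = (pn : Int) + 1 - pvMoveRight (Xs.take pn ++ [x]) Xs := by
  have hs : (Xs.take pn ++ [x]).length = pn + 1 := by
    simp [Nat.min_eq_left (le_of_lt hpn)]
  unfold pvMoveRight
  rw [hs]
  rcases Nat.eq_zero_or_pos pn with h0 | h0
  · subst h0
    rw [bs_zero]
    simp only [pvScanB, Nat.cast_zero]
    rw [if_neg (by simp)]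
    rw [PySem.List.pyRange_one_eq_nil (by omega)]
    simp only [pvMoveRightGo]
    rw [hs]
    omega
  · obtain ⟨m, rfl⟩ : ∃ m, pn = m + 1 := ⟨pn - 1, by omega⟩
    rw [bs_succ, if_pos (List.suffix_refl _)]
    simp only [List.singleton_append, pvScanB]
    rw [if_neg (by push_cast; omega)]
    have h := scan_aux Xs x (m+1) hpn m (by omega)
    push_cast at h ⊢
    rw [show (m : Int) + 1 - (m : Int) = 1 by omega] at h
    exact h

-- ---- the first proper border in the final set equals A's full-match value ----

theorem bfull_aux (Xs : List Char) :
    ∀ m : Nat, m < Xs.length →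
      pvFirstLt (Xs.length : Int) (pvBS Xs Xs.length m) 0
        = (Xs.length : Int) - pvMoveRightGo Xs Xs
            (PySem.List.pyRange ((Xs.length : Int) - m) (Xs.length : Int) 1) := by
  intro m
  induction m with
  | zero =>
    intro h0
    rw [bs_zero]
    simp only [pvFirstLt, Nat.cast_zero, sub_zero]
    rw [if_pos (by exact_mod_cast h0)]
    rw [PySem.List.pyRange_one_eq_nil (by omega)]
    simp only [pvMoveRightGo]
    omega
  | succ m ih =>
    intro hm
    rw [bs_succ]
    push_cast
    have hr : PySem.List.pyRange ((Xs.length : Int) - ((m : Int) + 1)) (Xs.length : Int) 1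
        = ((Xs.length : Int) - ((m : Int) + 1))
            :: PySem.List.pyRange ((Xs.length : Int) - (m : Int)) (Xs.length : Int) 1 := by
      rw [PySem.List.pyRange_one_cons (by omega)]
      congr 2
      omega
    rw [hr]
    have hc1 : (Xs.length : Int) - ((Xs.length : Int) - ((m : Int) + 1)) = ((m + 1 : Nat) : Int) := by
      push_cast; ring
    have hc2 : ((Xs.length : Int) - ((m : Int) + 1)) = (Xs.length : Int) - ((m + 1 : Nat) : Int) := by
      push_cast; ring
    have hcond : (PySem.List.slice Xs (some ((Xs.length : Int) - ((m : Int) + 1))) none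
        = PySem.List.slice Xs none (some ((Xs.length : Int) - ((Xs.length : Int) - ((m : Int) + 1)))))
        ↔ Xs.take (m+1) <:+ Xs := by
      rw [hc1, hc2]
      exact slice_cond_iff Xs Xs (m+1) (by omega) (by omega)
    have htk : Xs.take Xs.length = Xs := List.take_length
    simp only [pvMoveRightGo]
    by_cases hb : Xs.take (m+1) <:+ Xs
    · rw [if_pos (by rw [htk]; exact hb)]
      simp only [List.singleton_append, pvFirstLt]
      rw [if_pos (by omega), if_pos (hcond.mpr hb)]
      omega
    · rw [if_neg (by rw [htk]; exact hb), if_neg (fun h => hb (hcond.mp h))]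
      simp only [List.nil_append]
      exact ih (by omega)

theorem bfull_eq (Xs : List Char) (hne : Xs ≠ []) :
    pvFirstLt (Xs.length : Int) (pvBS Xs Xs.length Xs.length) 0
      = (Xs.length : Int) - pvMoveRight Xs Xs := by
  have hpos : 0 < Xs.length := List.length_pos_iff.mpr hne
  obtain ⟨m, hm⟩ : ∃ m, Xs.length = m + 1 := ⟨Xs.length - 1, by omega⟩
  unfold pvMoveRight
  rw [hm, bs_succ, if_pos (by rw [← hm, List.take_length])]
  simp only [List.singleton_append, pvFirstLt]
  rw [if_neg (by push_cast; omega)]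
  have h := bfull_aux Xs m (by omega)
  rw [hm] at h
  push_cast at h
  rw [show (m : Int) + 1 - (m : Int) = 1 by omega] at h
  push_cast
  exact h

theorem scanB_nonneg (Xs : List Char) (p : Int) (x : Char) :
    ∀ ls : List Int, (∀ l ∈ ls, 0 ≤ l) → 0 ≤ pvScanB Xs p x ls := by
  intro ls
  induction ls with
  | nil => intro _; simp [pvScanB]
  | cons l ls ih =>
    intro h
    unfold pvScanB
    split
    · have := h l (by simp); omega
    · exact ih (fun u hu => h u (by simp [hu]))

theorem firstLt_nonneg (n : Int) :
    ∀ (ls : List Int) (b : Int), (∀ l ∈ ls, 0 ≤ l) → 0 ≤ b → 0 ≤ pvFirstLt n ls b := by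
  intro ls
  induction ls with
  | nil => intro b _ hb; simpa [pvFirstLt] using hb
  | cons l ls ih =>
    intro b h hb
    unfold pvFirstLt
    split
    · exact h l (by simp)
    · exact ih b (fun u hu => h u (by simp [hu])) hb

-- ---- matrix machinery (shared with the old proof) ----

theorem modify_id_eq (l : List (List Int)) (i : Nat) : l.modify i (fun r => r) = l := by
  apply List.ext_getElem (by simp [List.length_modify])
  intro j h1 h2
  rw [List.getElem_modify]
  split <;> rfl

theorem modify_modify_eq (l : List (List Int)) (i : Nat) (f g : List Int → List Int) :
    (l.modify i f).modify i g = l.modify i (fun r => g (f r)) := by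
  apply List.ext_getElem (by simp [List.length_modify])
  intro j h1 h2
  rw [List.getElem_modify, List.getElem_modify, List.getElem_modify]
  split <;> rfl

theorem foldl_modify_fuse {α : Type} (l : List α) (i : Nat)
    (F : List (List Int) → α → List (List Int)) (f : List Int → α → List Int)
    (hF : ∀ M x, F M x = M.modify i (fun r => f r x)) (M : List (List Int)) :
    l.foldl F M = M.modify i (fun r => l.foldl f r) := by
  induction l generalizing M with
  | nil => simp [modify_id_eq]
  | cons x l ih =>
    rw [List.foldl_cons, hF, ih, modify_modify_eq]
    simp only [List.foldl_cons]

theorem length_foldl_range_modify (h : Nat → List Int → List Int) :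
    ∀ (m : Nat) (M : List (List Int)),
      ((List.range m).foldl (fun M jj => M.modify jj (h jj)) M).length = M.length := by
  intro m
  induction m with
  | zero => intro M; rfl
  | succ m ih => intro M; rw [List.range_succ, List.foldl_append]; simp [List.length_modify, ih]

theorem getElem_foldl_range_modify (h : Nat → List Int → List Int) :
    ∀ (m : Nat) (M : List (List Int)) (j : Nat) (hj : j < M.length)
      (hj2 : j < ((List.range m).foldl (fun M jj => M.modify jj (h jj)) M).length),
      ((List.range m).foldl (fun M jj => M.modify jj (h jj)) M)[j]'hj2
        = if j < m then h j (M[j]) else M[j] := by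
  intro m
  induction m with
  | zero => intro M j hj hj2; simp
  | succ m ih =>
    intro M j hj hj2
    simp only [List.range_succ, List.foldl_append, List.foldl_cons, List.foldl_nil]
    rw [List.getElem_modify]
    by_cases hm : m = j
    · subst hm
      rw [ih M m hj (by rw [length_foldl_range_modify]; exact hj)]
      simp
    · rw [if_neg hm, ih M j hj (by rw [length_foldl_range_modify]; exact hj)]
      by_cases hlt : j < m
      · rw [if_pos hlt, if_pos (by omega)]
      · rw [if_neg hlt, if_neg (by omega)]

theorem flatMap_targets_perm {α : Type} [DecidableEq α] (xp : α) (e : List Int) (g : α → Int) :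
    ∀ (l : List α), l.Nodup →
      (l.flatMap (fun x => if x = xp then e else [g x])).Perm
        ((l.filter (fun x => x != xp)).map g ++ (if xp ∈ l then e else [])) := by
  intro l
  induction l with
  | nil => simp
  | cons x l ih =>
    intro hnd
    have hnd' : l.Nodup := (List.nodup_cons.mp hnd).2
    have h2 := ih hnd'
    rw [List.flatMap_cons]
    by_cases hx : x = xp
    · subst hx
      have hxl : x ∉ l := (List.nodup_cons.mp hnd).1
      rw [if_neg hxl, List.append_nil] at h2
      simp only [List.filter_cons, bne_self_eq_false, List.mem_cons, true_or, if_pos,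
        Bool.false_eq_true, if_false]
      exact (h2.append_left e).trans List.perm_append_comm
    · have hbne : (x != xp) = true := by simp [hx]
      simp only [if_neg hx, List.filter_cons, hbne, if_true, List.map_cons, List.cons_append,
        List.mem_cons]
      have hmem : (xp = x ∨ xp ∈ l) ↔ xp ∈ l := by
        constructor
        · rintro (h | h)
          · exact absurd h.symm hx
          · exact h
        · exact Or.inr
      rw [if_congr hmem rfl rfl]
      exact h2.cons (g x)

theorem flatMap_range_decomp (b : Int) (hb : 0 < b) (f : Int → Int → List Int) :
    ∀ (m : Nat),
      (PySem.List.pyRange 0 (m : Int) 1).flatMap (fun p => (PySem.List.pyRange 0 b 1).map (fun k => f p k))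
        = (PySem.List.pyRange 0 ((m : Int) * b) 1).map
            (fun i => f (PySem.Int.floordiv i b) (PySem.Int.mod i b)) := by
  intro m
  induction m with
  | zero => simp [PySem.List.pyRange_one_eq_nil]
  | succ m ih =>
    have hc : (((m + 1 : Nat)) : Int) = (m : Int) + 1 := by omega
    rw [hc]
    rw [PySem.List.pyRange_one_succ_right (by positivity)]
    rw [List.flatMap_append, ih, List.flatMap_singleton]
    rw [PySem.List.pyRange_one_append 0 ((m : Int) * b) (((m : Int) + 1) * b) (by positivity) (by nlinarith)]
    rw [List.map_append]
    congr 1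
    apply List.ext_getElem
    · simp only [List.length_map, PySem.List.length_pyRange_one]
      rw [show ((m : Int) + 1) * b - (m : Int) * b = b by ring]
      omega
    · intro j h1 h2
      have hjb : (j : Int) < b := by
        simp only [List.length_map, PySem.List.length_pyRange_one] at h1
        omega
      rw [List.getElem_map, List.getElem_map, PySem.List.getElem_pyRange_one,
        PySem.List.getElem_pyRange_one]
      have hfd : PySem.Int.floordiv ((m : Int) * b + (j : Int)) b = (m : Int) := by
        rw [PySem.Int.floordiv_eq_iff_of_pos hb]
        constructor
        · omega
        · nlinarith
      have hmd : PySem.Int.mod ((m : Int) * b + (j : Int)) b = (j : Int) := by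
        have := PySem.Int.floordiv_mul_add_mod ((m : Int) * b + (j : Int)) b
        rw [hfd] at this
        omega
      rw [zero_add, hfd, hmd]

-- the A-row for state index i, as left by the fusing step of the main proof
def pvRowA (K : Int) (Xs : List Char) (i : Int) (r0 : List Int) : List Int :=
  pvAlphabet.foldl (fun r x =>
    if x = PySem.List.pyGetD Xs (PySem.Int.floordiv i (K + 1)) ' ' then
      if PySem.Int.floordiv i (K + 1) = (Xs.length : Int) - 1 then
        if PySem.Int.mod i (K + 1) > 0 then
          pvInc1 r (pvT2i K ((Xs.length : Int) - pvMoveRight Xs Xs) (PySem.Int.mod i (K + 1) - 1))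
        else r
      else pvInc1 r (pvT2i K (PySem.Int.floordiv i (K + 1) + 1) (PySem.Int.mod i (K + 1)))
    else
      pvInc1 r (pvT2i K (PySem.Int.floordiv i (K + 1) + 1 -
        pvMoveRight (PySem.List.slice Xs none (some (PySem.Int.floordiv i (K + 1))) ++ [x]) Xs)
        (PySem.Int.mod i (K + 1)))) r0

-- the B-row for state (p, k)
def pvRowB (K : Int) (Xs : List Char) (p k : Int) : List Int :=
  if pvAlphabet.contains (PySem.List.pyGetD Xs p ' ') then
    if p = (Xs.length : Int) - 1 then
      if k > 0 then
        pvInc1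
          (((pvAlphabet.filter (fun x => x != PySem.List.pyGetD Xs p ' ')).map
              (fun x => pvScanB Xs p x (PySem.List.pyGetD (pvBordersSpec Xs) p []))).foldl
            (fun r q => pvInc1 r (q * (K + 1) + k))
            (List.replicate (((Xs.length : Int)) * (K + 1)).toNat 0))
          (pvFirstLt (Xs.length : Int) (pvBS Xs Xs.length Xs.length) 0 * (K + 1) + (k - 1))
      else
        ((pvAlphabet.filter (fun x => x != PySem.List.pyGetD Xs p ' ')).map
            (fun x => pvScanB Xs p x (PySem.List.pyGetD (pvBordersSpec Xs) p []))).foldl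
          (fun r q => pvInc1 r (q * (K + 1) + k))
          (List.replicate (((Xs.length : Int)) * (K + 1)).toNat 0)
    else
      pvInc1
        (((pvAlphabet.filter (fun x => x != PySem.List.pyGetD Xs p ' ')).map
            (fun x => pvScanB Xs p x (PySem.List.pyGetD (pvBordersSpec Xs) p []))).foldl
          (fun r q => pvInc1 r (q * (K + 1) + k))
          (List.replicate (((Xs.length : Int)) * (K + 1)).toNat 0))
        ((p + 1) * (K + 1) + k)
  else
    ((pvAlphabet.filter (fun x => x != PySem.List.pyGetD Xs p ' ')).map
        (fun x => pvScanB Xs p x (PySem.List.pyGetD (pvBordersSpec Xs) p []))).foldl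
      (fun r q => pvInc1 r (q * (K + 1) + k))
      (List.replicate (((Xs.length : Int)) * (K + 1)).toNat 0)

theorem row_eq' (K : Int) (hK : 0 < K + 1) (Xs : List Char) (hne : Xs ≠ [])
    (p k : Int) (hp0 : 0 ≤ p) (hpn : p < (Xs.length : Int)) (hk0 : 0 ≤ k) :
    pvAlphabet.foldl (fun r x =>
      if x = PySem.List.pyGetD Xs p ' ' then
        if p = (Xs.length : Int) - 1 then
          if k > 0 then pvInc1 r (pvT2i K ((Xs.length : Int) - pvMoveRight Xs Xs) (k - 1)) else r
        else pvInc1 r (pvT2i K (p + 1) k)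
      else pvInc1 r (pvT2i K (p + 1 - pvMoveRight (PySem.List.slice Xs none (some p) ++ [x]) Xs) k))
      (List.replicate (((Xs.length : Int)) * (K + 1)).toNat 0)
    = pvRowB K Xs p k := by
  have hbp : PySem.List.pyGetD (pvBordersSpec Xs) p [] = pvBS Xs p.toNat p.toNat := by
    unfold pvBordersSpec
    rw [PySem.List.pyGetD_eq_getElem _ _ hp0 (by simp; omega)]
    simp
  have hpcast : ((p.toNat : Nat) : Int) = p := by omega
  have hptn : p.toNat < Xs.length := by omega
  have hsl : PySem.List.slice Xs none (some p) = Xs.take p.toNat := PySem.List.slice_to Xs hp0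
  set xp : Char := PySem.List.pyGetD Xs p ' ' with hxp
  set gB : Char → Int := fun x => pvScanB Xs p x (pvBS Xs p.toNat p.toNat) * (K + 1) + k with hgB
  have hscan : ∀ x : Char, pvScanB Xs p x (pvBS Xs p.toNat p.toNat)
      = p + 1 - pvMoveRight (Xs.take p.toNat ++ [x]) Xs := by
    intro x
    have := scan_eq Xs x p.toNat hptn
    rw [hpcast] at this
    exact this
  set bfull : Int := pvFirstLt (Xs.length : Int) (pvBS Xs Xs.length Xs.length) 0 with hbf
  have hbfull : bfull = (Xs.length : Int) - pvMoveRight Xs Xs := bfull_eq Xs hne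
  have hbf0 : 0 ≤ bfull := firstLt_nonneg _ _ 0 (bs_mem_nonneg Xs Xs.length Xs.length) le_rfl
  set eB : List Int := if p = (Xs.length : Int) - 1 then
      (if k > 0 then [bfull * (K + 1) + (k - 1)] else [])
    else [(p + 1) * (K + 1) + k] with heB
  set r0 : List Int := List.replicate (((Xs.length : Int)) * (K + 1)).toNat 0 with hr0
  have hgB0 : ∀ x, 0 ≤ gB x := by
    intro x
    have h1 : 0 ≤ pvScanB Xs p x (pvBS Xs p.toNat p.toNat) :=
      scanB_nonneg Xs p x _ (bs_mem_nonneg Xs p.toNat p.toNat)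
    simp only [hgB]
    exact add_nonneg (mul_nonneg h1 (by omega)) hk0
  have heB0 : ∀ t ∈ eB, 0 ≤ t := by
    intro t ht
    rw [heB] at ht
    split_ifs at ht with h1 h2
    · simp only [List.mem_singleton] at ht
      subst ht
      exact add_nonneg (mul_nonneg hbf0 (by omega)) (by omega)
    · simp at ht
    · simp only [List.mem_singleton] at ht
      subst ht
      exact add_nonneg (mul_nonneg (by omega) (by omega)) hk0
  have hL : pvAlphabet.foldl (fun r x =>
      if x = xp then
        if p = (Xs.length : Int) - 1 then
          if k > 0 then pvInc1 r (pvT2i K ((Xs.length : Int) - pvMoveRight Xs Xs) (k - 1)) else r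
        else pvInc1 r (pvT2i K (p + 1) k)
      else pvInc1 r (pvT2i K (p + 1 - pvMoveRight (PySem.List.slice Xs none (some p) ++ [x]) Xs) k)) r0
      = List.foldl pvInc1 r0 (pvAlphabet.flatMap (fun x => if x = xp then eB else [gB x])) := by
    rw [List.foldl_flatMap]
    apply (PySem.List.foldl_congr_mem _ _ _ _ _).symm
    intro r x _
    by_cases hxe : x = xp
    · rw [if_pos hxe, if_pos hxe, heB]
      by_cases h1 : p = (Xs.length : Int) - 1
      · rw [if_pos h1, if_pos h1]
        by_cases h2 : k > 0
        · rw [if_pos h2, if_pos h2]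
          simp only [List.foldl_cons, List.foldl_nil]
          congr 1
          simp only [pvT2i]
          rw [hbfull]
        · rw [if_neg h2, if_neg h2]
          simp only [List.foldl_nil]
      · rw [if_neg h1, if_neg h1]
        simp only [List.foldl_cons, List.foldl_nil]
        congr 1
    · rw [if_neg hxe, if_neg hxe]
      simp only [List.foldl_cons, List.foldl_nil]
      congr 1
      simp only [pvT2i, hgB]
      rw [hscan x, hsl]
  have hrow1 : ((pvAlphabet.filter (fun x => x != xp)).map
        (fun x => pvScanB Xs p x (PySem.List.pyGetD (pvBordersSpec Xs) p []))).foldl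
      (fun r q => pvInc1 r (q * (K + 1) + k)) r0
      = List.foldl pvInc1 r0 ((pvAlphabet.filter (fun x => x != xp)).map gB) := by
    rw [hbp, List.foldl_map, List.foldl_map]
  have hcont : (pvAlphabet.contains xp = true) ↔ xp ∈ pvAlphabet := by
    simp
  have hR : pvRowB K Xs p k
      = List.foldl pvInc1 r0 ((pvAlphabet.filter (fun x => x != xp)).map gB
          ++ (if xp ∈ pvAlphabet then eB else [])) := by
    rw [List.foldl_append]
    unfold pvRowB
    rw [← hxp, ← hbf, ← hr0, hrow1]

    by_cases hmem : xp ∈ pvAlphabet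
    · rw [if_pos hmem, if_pos (hcont.mpr hmem), heB]
      by_cases h1 : p = (Xs.length : Int) - 1
      · rw [if_pos h1, if_pos h1]
        by_cases h2 : k > 0
        · rw [if_pos h2, if_pos h2]
          simp only [List.foldl_cons, List.foldl_nil]
        · rw [if_neg h2, if_neg h2]
          simp only [List.foldl_nil]
      · rw [if_neg h1, if_neg h1]
        simp only [List.foldl_cons, List.foldl_nil]
    · rw [if_neg hmem, if_neg (fun h => hmem (hcont.mp h))]
      simp only [List.foldl_nil]
  rw [hL, hR]
  have hAmem : ∀ t ∈ pvAlphabet.flatMap (fun x => if x = xp then eB else [gB x]), 0 ≤ t := by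
    intro t ht
    rw [List.mem_flatMap] at ht
    obtain ⟨x, _, ht⟩ := ht
    by_cases hxe : x = xp
    · rw [if_pos hxe] at ht
      exact heB0 t ht
    · rw [if_neg hxe] at ht
      simp only [List.mem_singleton] at ht
      subst ht
      exact hgB0 x
  have hBmem : ∀ t ∈ (pvAlphabet.filter (fun x => x != xp)).map gB
      ++ (if xp ∈ pvAlphabet then eB else []), 0 ≤ t := by
    intro t ht
    rw [List.mem_append] at ht
    rcases ht with ht | ht
    · rw [List.mem_map] at ht
      obtain ⟨x, _, rfl⟩ := ht
      exact hgB0 x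
    · split_ifs at ht with h
      · exact heB0 t ht
      · simp at ht
  apply List.ext_getElem
  · rw [length_foldl_inc, length_foldl_inc]
  · intro j h1 h2
    have hj0 : j < r0.length := by
      rw [length_foldl_inc] at h1
      exact h1
    rw [getElem_foldl_inc _ _ hAmem j hj0 h1, getElem_foldl_inc _ _ hBmem j hj0 h2]
    congr 1
    exact_mod_cast (flatMap_targets_perm xp eB gB pvAlphabet (by decide)).count_eq ((j : Int))

theorem row_eq (K : Int) (hK : 0 < K + 1) (Xs : List Char) (hne : Xs ≠ []) (i : Int)
    (hi0 : 0 ≤ i) (hiN : i < (Xs.length : Int) * (K + 1)) :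
    pvRowA K Xs i (List.replicate (((Xs.length : Int)) * (K + 1)).toNat 0)
      = pvRowB K Xs (PySem.Int.floordiv i (K + 1)) (PySem.Int.mod i (K + 1)) := by
  have hp0 : 0 ≤ PySem.Int.floordiv i (K + 1) :=
    (PySem.Int.le_floordiv_iff_mul_le hK).mpr (by omega)
  have hpn : PySem.Int.floordiv i (K + 1) < (Xs.length : Int) :=
    (PySem.Int.floordiv_lt_iff_lt_mul hK).mpr hiN
  have hk0 : 0 ≤ PySem.Int.mod i (K + 1) := PySem.Int.mod_nonneg i hK
  unfold pvRowA
  exact row_eq' K hK Xs hne _ _ hp0 hpn hk0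

theorem matrixForString_spec : Claim_equal_matrixForString := by
  intro K X _
  unfold Spec_matrixForString matrixForString matrixForString_alt
  simp only [Prod.mk.injEq, build_eq]
  refine ⟨?_, by simp [pvT2i]⟩
  by_cases hK : 0 < K + 1
  · by_cases hX : X.toList = []
    · -- n = 0: both matrices are empty
      rw [hX]
      rw [PySem.List.pyRange_one_eq_nil (show pvT2i K ((([] : List Char).length : Int) - 1) K + 1 ≤ 0 by simp [pvT2i])]
      rw [PySem.List.pyRange_one_eq_nil (show ((([] : List Char).length : Int)) ≤ 0 by simp)]
      simp only [List.foldl_nil]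
      unfold pvZeros
      rw [PySem.List.pyRange_one_eq_nil (by simp [pvT2i])]
      simp
    · -- main case
      have hnpos : 0 < X.toList.length := List.length_pos_iff.mpr hX
      set Xs := X.toList with hXs
      set n : Int := (Xs.length : Int) with hn
      have hnpos' : 0 < n := by simp [hn]; omega
      have hNA : pvT2i K (n - 1) K + 1 = n * (K + 1) := by simp [pvT2i]; ring
      rw [hNA]
      -- B side: append-folds to flatMap, then to an indexed map
      simp only [PySem.List.foldl_append_singleton_eq_map]
      rw [PySem.List.foldl_append_eq_flatMap]
      rw [List.nil_append]
      rw [flatMap_range_decomp (K + 1) hK _ Xs.length]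
      -- A side: each loop iteration touches only row i; fuse it into a single List.modify
      suffices h : List.foldl
          (fun M i =>
            List.foldl
              (fun M x =>
                if x = PySem.List.pyGetD Xs (PySem.Int.floordiv i (K + 1)) ' ' then
                  if PySem.Int.floordiv i (K + 1) = n - 1 then
                    if PySem.Int.mod i (K + 1) > 0 then
                      pvMatInc M i (pvT2i K (n - pvMoveRight Xs Xs) (PySem.Int.mod i (K + 1) - 1))
                    else M
                  else pvMatInc M i (pvT2i K (PySem.Int.floordiv i (K + 1) + 1) (PySem.Int.mod i (K + 1)))
                else
                  pvMatInc M i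
                    (pvT2i K
                      (PySem.Int.floordiv i (K + 1) + 1 -
                        pvMoveRight (PySem.List.slice Xs none (some (PySem.Int.floordiv i (K + 1))) ++ [x]) Xs)
                      (PySem.Int.mod i (K + 1))))
              M pvAlphabet)
          (pvZeros (n * (K + 1)) (n * (K + 1))) (PySem.List.pyRange 0 (n * (K + 1)) 1)
          = List.map (fun i => pvRowB K Xs (PySem.Int.floordiv i (K + 1)) (PySem.Int.mod i (K + 1)))
              (PySem.List.pyRange 0 (n * (K + 1)) 1) by
        exact h
      rw [PySem.List.pyRange_one 0 (n * (K + 1))]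
      rw [List.foldl_map]
      simp only [zero_add, sub_zero]
      refine Eq.trans (PySem.List.foldl_congr_mem _ _
        (fun M (jj : Nat) => M.modify jj (fun r => pvRowA K Xs (jj : Int) r)) _ ?_) ?_
      · intro M jj _
        show _ = M.modify jj (fun r => pvRowA K Xs (jj : Int) r)
        unfold pvRowA
        apply foldl_modify_fuse
        intro M' x
        split_ifs <;> first
          | (exact (modify_id_eq _ _).symm)
          | (unfold pvMatInc; simp only [Int.toNat_natCast]; try rfl)
      · -- both sides elementwise
        apply List.ext_getElem
        · rw [length_foldl_range_modify]
          unfold pvZeros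
          simp [PySem.List.length_pyRange_one]
        · intro j h1 h2
          have hjM : j < (pvZeros (n * (K + 1)) (n * (K + 1))).length := by
            rw [length_foldl_range_modify] at h1
            exact h1
          have hjN : j < (n * (K + 1)).toNat := by
            unfold pvZeros at hjM
            simpa [PySem.List.length_pyRange_one] using hjM
          rw [getElem_foldl_range_modify _ _ _ j hjM h1]
          rw [if_pos hjN]
          rw [List.getElem_map, List.getElem_map, List.getElem_range]
          have hM0 : (pvZeros (n * (K + 1)) (n * (K + 1)))[j]'hjM
              = List.replicate (n * (K + 1)).toNat (0 : Int) := by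
            unfold pvZeros
            rw [List.getElem_map]
          rw [hM0]
          exact row_eq K hK Xs hX (j : Int) (by positivity) (by rw [hn] at hjN; omega)
  · -- K + 1 ≤ 0: both matrices are empty
    have hN : pvT2i K ((X.toList.length : Int) - 1) K + 1 ≤ 0 := by
      have h0 : (0:Int) ≤ (X.toList.length : Int) := by positivity
      simp only [pvT2i]
      nlinarith
    rw [PySem.List.pyRange_one_eq_nil hN]
    rw [PySem.List.pyRange_one_eq_nil (show K + 1 ≤ 0 by omega)]
    simp only [List.foldl_nil]
    unfold pvZeros
    rw [PySem.List.pyRange_one_eq_nil hN]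
    simp only [List.map_nil]
    rw [PySem.List.foldl_ignore]
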